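-- pv_equiv track=rewrite | github.com/pypi-data/pypi-mirror-369 | packages/vibe-automation/vibe_automation-0.11.0-py3-none-any.whl/va/code/mutator.py | _find_with_block_end
-- ===== SOURCE A (Python) =====
-- from typing import List, Dict, Tuple
--
-- def _find_with_block_end(lines: List[str], with_line_idx: int) -> int:
--     """Find the end of a with block using simple indentation tracking."""
--     with_line = lines[with_line_idx]
--     with_indent = len(with_line) - len(with_line.lstrip())
--
--     # Look for the next line that's at the same or lower indentation level
--     last_block_line = with_line_idx
--     for i in range(with_line_idx + 1, len(lines)):
--         line = lines[i]
--         if line.strip():  # Ignore empty lines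
--             line_indent = len(line) - len(line.lstrip())
--             if line_indent <= with_indent:
--                 return last_block_line
--             else:
--                 # This line is part of the with block
--                 last_block_line = i
--         else:
--             # Empty line - could be part of the block or after it
--             # We'll include it if the next non-empty line is still in the block
--             continue
--
--     return last_block_line
-- ===== SOURCE B (Python) =====
-- from typing import List
--
--
-- def _find_with_block_end(lines: List[str], with_line_idx: int) -> int:
--     """Find the end of a with block: locate the block boundary, then trim
--     trailing blank lines by scanning backward."""
--     with_line = lines[with_line_idx]
--     with_indent = len(with_line) - len(with_line.lstrip())
--
--     # First pass: the boundary is the first non-empty line at or below the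
--     # with-statement's indentation; if none, the end of the file.
--     boundary = len(lines)
--     for i in range(with_line_idx + 1, len(lines)):
--         line = lines[i]
--         if line.strip() and len(line) - len(line.lstrip()) <= with_indent:
--             boundary = i
--             break
--
--     # Second pass: walk backward from the boundary to the last content line.
--     for i in range(boundary - 1, with_line_idx, -1):
--         if lines[i].strip():
--             return i
--     return with_line_idx
-- ===== Notes on version B (the rewrite author's own statement) =====
-- stated objective: alternative
-- what changed: Replaces A's single accumulating pass (which carries last_block_line through the whole scan) by a find-boundary-then-trim pair: a forward scan that only locates the first dedented non-empty line, then a backward scan from that boundary for the last content line.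
import Mathlib
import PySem

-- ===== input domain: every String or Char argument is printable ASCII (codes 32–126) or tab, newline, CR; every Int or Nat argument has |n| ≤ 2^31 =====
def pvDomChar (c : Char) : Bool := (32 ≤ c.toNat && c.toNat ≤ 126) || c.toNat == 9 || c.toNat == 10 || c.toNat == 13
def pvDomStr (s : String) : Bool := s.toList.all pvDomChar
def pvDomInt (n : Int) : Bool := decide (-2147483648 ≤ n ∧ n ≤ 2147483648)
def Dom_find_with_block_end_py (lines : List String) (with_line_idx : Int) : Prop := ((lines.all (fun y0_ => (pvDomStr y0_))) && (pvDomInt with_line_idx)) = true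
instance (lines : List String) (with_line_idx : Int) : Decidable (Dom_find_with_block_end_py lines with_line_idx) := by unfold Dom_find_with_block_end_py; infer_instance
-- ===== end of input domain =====

-- B replaces A's single accumulating pass by a find-boundary-then-trim-backward pair (alternative decomposition, same cost).

-- ===== PORT A =====
-- leading indentation: len(line) - len(line.lstrip())
def pvIndent (s : String) : Int := PySem.Str.len s - PySem.Str.len (PySem.Str.lstrip s)

-- A's loop 'for i in range(with_line_idx+1, len(lines))' ported as structural recursion over
-- the enumerated (index, lines[i]) pairs of exactly that range; same state last_block_line.
def pvLoopA : List (Int × String) → Int → Int → Int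
  | [], _, last => last
  | (i, l) :: r, w, last =>
    if PySem.Str.strip l ≠ "" then
      if pvIndent l ≤ w then last else pvLoopA r w i
    else pvLoopA r w last

def find_with_block_end_py (lines : List String) (with_line_idx : Int) : Int :=
  -- lines[with_line_idx]; IndexError (pyGet? = none) excluded by Pre_
  let with_line := (PySem.List.pyGet? lines with_line_idx).getD ""
  let with_indent := pvIndent with_line
  pvLoopA ((PySem.List.pyRange (with_line_idx + 1) (PySem.List.len lines) 1).map
            (fun j => (j, PySem.List.pyGetD lines j "")))
    with_indent with_line_idx

-- ===== PORT B =====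
-- B's first loop: first index whose line is non-empty with indent <= with_indent (break)
def pvFindBoundary (w : Int) : List (Int × String) → Option Int
  | [] => none
  | (i, l) :: r =>
    if PySem.Str.strip l ≠ "" ∧ pvIndent l ≤ w then some i else pvFindBoundary w r

-- B's second loop 'for i in range(boundary-1, with_line_idx, -1): if lines[i].strip(): return i'
def pvBackFind : List (Int × String) → Option Int
  | [] => none
  | (i, l) :: r => if PySem.Str.strip l ≠ "" then some i else pvBackFind r

def find_with_block_end_py_alt (lines : List String) (with_line_idx : Int) : Int :=
  let with_line := (PySem.List.pyGet? lines with_line_idx).getD ""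
  let with_indent := pvIndent with_line
  let ps := (PySem.List.pyRange (with_line_idx + 1) (PySem.List.len lines) 1).map
              (fun j => (j, PySem.List.pyGetD lines j ""))
  let b := (pvFindBoundary with_indent ps).getD (PySem.List.len lines)
  -- range(b-1, with_line_idx, -1) over lines[i] = the pairs of ps with index < b, reversed
  (pvBackFind ((ps.take (b - (with_line_idx + 1)).toNat).reverse)).getD with_line_idx

-- ===== PRECONDITION & SPEC =====
-- Pre_ excludes exactly the inputs where lines[with_line_idx] raises IndexError.
def Pre_find_with_block_end_py (lines : List String) (with_line_idx : Int) : Prop :=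
  PySem.Raise.InRange lines.length with_line_idx
instance (lines : List String) (with_line_idx : Int) : Decidable (Pre_find_with_block_end_py lines with_line_idx) := by unfold Pre_find_with_block_end_py; infer_instance

def pvWitness_find_with_block_end_py : List String × Int := (["with x:", "    y", "", "  z", "done"], 0)

def Spec_find_with_block_end_py (lines : List String) (with_line_idx : Int) (out : Int) : Prop := out = find_with_block_end_py_alt lines with_line_idx
instance (lines : List String) (with_line_idx : Int) (out : Int) : Decidable (Spec_find_with_block_end_py lines with_line_idx out) := by unfold Spec_find_with_block_end_py; infer_instance

-- ===== CLAIM (what is proved, stated in full; the proofs are below) =====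
def Claim_equal_find_with_block_end_py : Prop := ∀ (lines : List String) (with_line_idx : Int), Dom_find_with_block_end_py lines with_line_idx → Pre_find_with_block_end_py lines with_line_idx → Spec_find_with_block_end_py lines with_line_idx (find_with_block_end_py lines with_line_idx)

-- ===== LEMMAS AND PROOFS =====

-- consecutive enumeration starting at i
def pvEnumAt : Int → List String → List (Int × String)
  | _, [] => []
  | i, s :: r => (i, s) :: pvEnumAt (i + 1) r

theorem pvMapRange_eq_enumAt (f : Int → String) (a b : Int) :
    (PySem.List.pyRange a b 1).map (fun j => (j, f j)) =
      pvEnumAt a ((PySem.List.pyRange a b 1).map f) := by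
  by_cases h : a < b
  · have hn : (b - a).toNat ≠ 0 := by omega
    generalize hk : (b - a).toNat = k at *
    induction k generalizing a with
    | zero => omega
    | succ k ih =>
      rw [PySem.List.pyRange_one_cons h]
      simp only [List.map_cons, pvEnumAt]
      by_cases h' : a + 1 < b
      · rw [ih (a + 1) h' (by omega) (by omega)]
      · have : PySem.List.pyRange (a + 1) b 1 = [] := by
          simp [PySem.List.pyRange_one]
          omega
        simp [this, pvEnumAt]
  · have : PySem.List.pyRange a b 1 = [] := by
      simp [PySem.List.pyRange_one]
      omega
    simp [this, pvEnumAt]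

theorem pvFindBoundary_ge (w : Int) (r : List String) (i : Int) :
    i ≤ (pvFindBoundary w (pvEnumAt i r)).getD (i + r.length) := by
  induction r generalizing i with
  | nil => simp [pvEnumAt, pvFindBoundary]
  | cons l r ih =>
    simp only [pvEnumAt, pvFindBoundary]
    split
    · simp
    · have := ih (i + 1)
      simp only [List.length_cons]
      have harith : i + ((r.length : Int) + 1) = i + 1 + (r.length : Int) := by ring
      push_cast
      rw [harith]
      omega

theorem pvBackFind_append (xs : List (Int × String)) (p : Int × String) :
    pvBackFind (xs ++ [p]) =
      (match pvBackFind xs with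
       | some v => some v
       | none => if PySem.Str.strip p.2 ≠ "" then some p.1 else none) := by
  induction xs with
  | nil => simp [pvBackFind]
  | cons q xs ih =>
    simp only [List.cons_append, pvBackFind, ih]
    split <;> simp

theorem pvMain (t : List String) (w : Int) (i last : Int) :
    pvLoopA (pvEnumAt i t) w last =
      (pvBackFind (((pvEnumAt i t).take
        ((((pvFindBoundary w (pvEnumAt i t)).getD (i + t.length)) - i)).toNat)).reverse).getD last := by
  induction t generalizing i last with
  | nil => simp [pvEnumAt, pvLoopA, pvFindBoundary, pvBackFind]
  | cons l r ih =>
    simp only [pvEnumAt, pvLoopA, pvFindBoundary]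
    by_cases hnb : PySem.Str.strip l ≠ ""
    · by_cases hind : pvIndent l ≤ w
      · simp [hnb, hind, pvBackFind]
      · have hcond : ¬ (PySem.Str.strip l ≠ "" ∧ pvIndent l ≤ w) := by tauto
        simp only [if_pos hnb, if_neg hind, if_neg hcond]
        have hge := pvFindBoundary_ge w r (i + 1)
        set b := (pvFindBoundary w (pvEnumAt (i + 1) r)).getD ((i + 1) + r.length) with hb
        have hdef : (pvFindBoundary w (pvEnumAt (i + 1) r)).getD (i + ((l :: r).length : Int)) = b := by
          simp only [hb, List.length_cons]
          push_cast
          ring_nf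
        rw [hdef]
        have htn : (b - i).toNat = (b - (i + 1)).toNat + 1 := by omega
        rw [htn, List.take_succ_cons, List.reverse_cons, pvBackFind_append]
        rw [ih (i + 1) i]
        rw [hb]
        cases hfb : pvBackFind ((pvEnumAt (i + 1) r).take (b - (i + 1)).toNat).reverse with
        | some v => simp
        | none => simp [hnb]
    · have hcond : ¬ (PySem.Str.strip l ≠ "" ∧ pvIndent l ≤ w) := by tauto
      simp only [if_neg hnb, if_neg hcond]
      have hge := pvFindBoundary_ge w r (i + 1)
      set b := (pvFindBoundary w (pvEnumAt (i + 1) r)).getD ((i + 1) + r.length) with hb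
      have hdef : (pvFindBoundary w (pvEnumAt (i + 1) r)).getD (i + ((l :: r).length : Int)) = b := by
        simp only [hb, List.length_cons]
        push_cast
        ring_nf
      rw [hdef]
      have htn : (b - i).toNat = (b - (i + 1)).toNat + 1 := by omega
      rw [htn, List.take_succ_cons, List.reverse_cons, pvBackFind_append]
      rw [ih (i + 1) last]
      rw [hb]
      cases hfb : pvBackFind ((pvEnumAt (i + 1) r).take (b - (i + 1)).toNat).reverse with
      | some v => simp
      | none => simp [hnb]

-- ===== VERDICT (by name: the statement is the Claim_ definition above) =====
theorem find_with_block_end_py_spec : Claim_equal_find_with_block_end_py := by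
  intro lines idx _hdom hpre
  unfold Spec_find_with_block_end_py find_with_block_end_py find_with_block_end_py_alt
  simp only []
  set f : Int → String := fun j => PySem.List.pyGetD lines j "" with hf
  have hps := pvMapRange_eq_enumAt f (idx + 1) (PySem.List.len lines)
  set t := (PySem.List.pyRange (idx + 1) (PySem.List.len lines) 1).map f with ht
  unfold Pre_find_with_block_end_py PySem.Raise.InRange at hpre
  have hlen : (idx + 1) + (t.length : Int) = PySem.List.len lines := by
    rw [ht]
    simp [PySem.List.length_pyRange_one, PySem.List.len]
    omega
  rw [hps]
  rw [← hlen]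
  exact pvMain t _ (idx + 1) idx
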